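-- pv_equiv track=rewrite | github.com/tdurham86/PREDICTD | generate_folds.py | evaluateSplit
-- ===== SOURCE A (Python) =====
-- def computeSumOfMaxes(numSplits, names, counts):
--     returnValue = 0
--     for name in names:
--         maxValue = 0
--         for splitIndex in range(0, numSplits):
--             if (name, splitIndex) in counts:
--                 thisValue = counts[(name, splitIndex)]
--             else:
--                 thisValue = 0
--             if (thisValue > maxValue):
--                 maxValue = thisValue
--         returnValue += maxValue
--     return(returnValue)
--
-- def evaluateSplit(numSplits, splitMatrices):
--     # Make a count of the number of times we see each row label
--     # associated with a split number.
--     rowMarginals = {}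
--     rowNames = {}
--     for myTuple in splitMatrices:
--         (myRow, myColumn, mySubset) = myTuple
--         rowNames[myRow] = True
--         if (myRow, mySubset) in rowMarginals:
--             rowMarginals[(myRow, mySubset)] += 1
--         else:
--             rowMarginals[(myRow, mySubset)] = 1
--
--     # Do the same for columns.
--     columnMarginals = {}
--     columnNames = {}
--     for myTuple in splitMatrices:
--         (myRow, myColumn, mySubset) = myTuple
--         columnNames[myColumn ] = True
--         if (myColumn, mySubset) in columnMarginals:
--             columnMarginals[(myColumn, mySubset)] += 1
--         else:
--             columnMarginals[(myColumn, mySubset)] = 1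
--
--     return(computeSumOfMaxes(numSplits, rowNames, rowMarginals)
--            + computeSumOfMaxes(numSplits, columnNames, columnMarginals))
-- ===== SOURCE B (Python) =====
-- def evaluateSplit(numSplits, splitMatrices):
--     # One pass: per-(name, subset) running counts plus a running maximum per
--     # name, restricted to subsets in range(numSplits); the final running max
--     # equals the max over splits of the final marginal counts.
--     rowCnt = {}
--     colCnt = {}
--     rowBest = {}
--     colBest = {}
--     for r, c, s in splitMatrices:
--         if 0 <= s < numSplits:
--             v = rowCnt.get((r, s), 0) + 1
--             rowCnt[(r, s)] = v
--             if v > rowBest.get(r, 0):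
--                 rowBest[r] = v
--             w = colCnt.get((c, s), 0) + 1
--             colCnt[(c, s)] = w
--             if w > colBest.get(c, 0):
--                 colBest[c] = w
--     return sum(rowBest.values()) + sum(colBest.values())
-- ===== Notes on version B (the rewrite author's own statement) =====
-- stated objective: faster
-- what changed: Instead of building marginal dicts and then scanning all numSplits split indices for every name, B makes a single pass over the entries keeping per-(name,subset) counts and a running per-name maximum restricted to in-range subsets, then sums the maxima.
import Mathlib
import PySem

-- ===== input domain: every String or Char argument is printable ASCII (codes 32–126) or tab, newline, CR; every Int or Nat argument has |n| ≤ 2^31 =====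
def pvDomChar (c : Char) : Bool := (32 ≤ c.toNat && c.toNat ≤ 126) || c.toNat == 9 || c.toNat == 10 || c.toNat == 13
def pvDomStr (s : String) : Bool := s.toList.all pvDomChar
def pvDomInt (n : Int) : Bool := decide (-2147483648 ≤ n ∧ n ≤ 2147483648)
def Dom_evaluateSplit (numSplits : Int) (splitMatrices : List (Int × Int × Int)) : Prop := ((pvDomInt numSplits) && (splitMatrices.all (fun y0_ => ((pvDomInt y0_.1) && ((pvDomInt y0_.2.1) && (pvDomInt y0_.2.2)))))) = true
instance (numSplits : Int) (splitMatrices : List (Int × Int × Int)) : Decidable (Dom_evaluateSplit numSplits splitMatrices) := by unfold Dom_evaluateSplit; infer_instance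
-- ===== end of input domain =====

-- B replaces A's per-name scan over all numSplits split indices by a single pass over the
-- entries that keeps per-(name, subset) counts and a running per-name maximum (in-range
-- subsets only), then sums the maxima; proved to return exactly A's value on every input.

-- ===== PORT A =====
-- Python helper computeSumOfMaxes: 'for name in names' iterates the dict's keys in
-- insertion order; 'counts[(name, splitIndex)]' is guarded by the membership test, so
-- getD with default 0 under the contains branch is exact.
def computeSumOfMaxes (numSplits : Int) (names : PySem.Dict Int Bool) (counts : PySem.Dict (Int × Int) Int) : Int :=
  names.keys.foldl (fun returnValue name =>
    returnValue +
      (PySem.List.pyRange 0 numSplits 1).foldl (fun maxValue splitIndex =>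
        let thisValue := if counts.contains (name, splitIndex) then counts.getD (name, splitIndex) 0 else 0
        if thisValue > maxValue then thisValue else maxValue) 0) 0

def evaluateSplit (numSplits : Int) (splitMatrices : List (Int × Int × Int)) : Int :=
  -- first loop: rowNames / rowMarginals as a pair accumulator
  let st1 := splitMatrices.foldl
    (fun (st : PySem.Dict Int Bool × PySem.Dict (Int × Int) Int) t =>
      (st.1.insert t.1 true,
       if st.2.contains (t.1, t.2.2) then st.2.modify (t.1, t.2.2) 0 (· + 1)
       else st.2.insert (t.1, t.2.2) 1))
    (PySem.Dict.empty, PySem.Dict.empty)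
  -- second loop: columnNames / columnMarginals
  let st2 := splitMatrices.foldl
    (fun (st : PySem.Dict Int Bool × PySem.Dict (Int × Int) Int) t =>
      (st.1.insert t.2.1 true,
       if st.2.contains (t.2.1, t.2.2) then st.2.modify (t.2.1, t.2.2) 0 (· + 1)
       else st.2.insert (t.2.1, t.2.2) 1))
    (PySem.Dict.empty, PySem.Dict.empty)
  computeSumOfMaxes numSplits st1.1 st1.2 + computeSumOfMaxes numSplits st2.1 st2.2

-- ===== PORT B =====
-- one side's body of B's loop (the Python does the same update once for the row
-- projection and once for the column projection of each entry)
def bStep (numSplits : Int) (st : PySem.Dict (Int × Int) Int × PySem.Dict Int Int) (k : Int × Int) :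
    PySem.Dict (Int × Int) Int × PySem.Dict Int Int :=
  if 0 ≤ k.2 ∧ k.2 < numSplits then
    let v := st.1.getD k 0 + 1
    (st.1.insert k v, if v > st.2.getD k.1 0 then st.2.insert k.1 v else st.2)
  else st

def evaluateSplit_alt (numSplits : Int) (splitMatrices : List (Int × Int × Int)) : Int :=
  let st := splitMatrices.foldl
    (fun (st : (PySem.Dict (Int × Int) Int × PySem.Dict Int Int) × (PySem.Dict (Int × Int) Int × PySem.Dict Int Int)) t =>
      (bStep numSplits st.1 (t.1, t.2.2), bStep numSplits st.2 (t.2.1, t.2.2)))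
    ((PySem.Dict.empty, PySem.Dict.empty), (PySem.Dict.empty, PySem.Dict.empty))
  st.1.2.values.sum + st.2.2.values.sum

-- ===== PRECONDITION & SPEC =====
def Spec_evaluateSplit (numSplits : Int) (splitMatrices : List (Int × Int × Int)) (out : Int) : Prop := out = evaluateSplit_alt numSplits splitMatrices
instance (numSplits : Int) (splitMatrices : List (Int × Int × Int)) (out : Int) : Decidable (Spec_evaluateSplit numSplits splitMatrices out) := by unfold Spec_evaluateSplit; infer_instance

-- ===== CLAIM (what is proved, stated in full; the proofs are below) =====
def Claim_equal_evaluateSplit : Prop := ∀ (numSplits : Int) (splitMatrices : List (Int × Int × Int)), Dom_evaluateSplit numSplits splitMatrices → Spec_evaluateSplit numSplits splitMatrices (evaluateSplit numSplits splitMatrices)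

-- ===== LEMMAS AND PROOFS =====

-- proof-side abbreviations: counts, and the max of a projection over range(numSplits)
def pvCnt (ps : List (Int × Int)) (k : Int × Int) : Int := (ps.count k : Int)

def pvBest (n : Int) (c : Int → Int) : Int :=
  (PySem.List.pyRange 0 n 1).foldl (fun m s => max m (c s)) 0

-- one marginal-building step of A, and the generic per-projection sides
def pvStepA (d : PySem.Dict (Int × Int) Int) (k : Int × Int) : PySem.Dict (Int × Int) Int :=
  if d.contains k then d.modify k 0 (· + 1) else d.insert k 1

def pvASide (n : Int) (ps : List (Int × Int)) : Int :=
  computeSumOfMaxes n (ps.foldl (fun d k => d.insert k.1 true) PySem.Dict.empty)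
    (ps.foldl pvStepA PySem.Dict.empty)

def pvBSide (n : Int) (ps : List (Int × Int)) : Int :=
  (ps.foldl (bStep n) (PySem.Dict.empty, PySem.Dict.empty)).2.values.sum

lemma pv_foldl_max_le (t : List Int) (i B : Int) (hi : i ≤ B) (h : ∀ x ∈ t, x ≤ B) :
    t.foldl max i ≤ B := by
  induction t generalizing i with
  | nil => simpa using hi
  | cons x t ih =>
    simp only [List.foldl_cons]
    exact ih (max i x) (max_le hi (h x (by simp))) (fun y hy => h y (by simp [hy]))

lemma pvBest_eq_foldl_map (n : Int) (c : Int → Int) :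
    pvBest n c = ((PySem.List.pyRange 0 n 1).map c).foldl max 0 := by
  simp [pvBest, List.foldl_map]

lemma pvBest_nonneg (n : Int) (c : Int → Int) : 0 ≤ pvBest n c := by
  rw [pvBest_eq_foldl_map]
  exact (PySem.List.le_foldl_max _ _).1

lemma le_pvBest (n : Int) (c : Int → Int) (s : Int) (hs : s ∈ PySem.List.pyRange 0 n 1) :
    c s ≤ pvBest n c := by
  rw [pvBest_eq_foldl_map]
  exact (PySem.List.le_foldl_max _ _).2 (c s) (List.mem_map_of_mem hs)

lemma pvBest_congr {n : Int} {c c' : Int → Int}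
    (h : ∀ s ∈ PySem.List.pyRange 0 n 1, c s = c' s) : pvBest n c = pvBest n c' := by
  unfold pvBest
  exact PySem.List.foldl_congr_mem _ _ _ _ (fun acc x hx => by rw [h x hx])

lemma pvBest_zero {n : Int} {c : Int → Int}
    (h : ∀ s ∈ PySem.List.pyRange 0 n 1, c s ≤ 0) : pvBest n c = 0 := by
  refine le_antisymm ?_ (pvBest_nonneg n c)
  rw [pvBest_eq_foldl_map]
  refine pv_foldl_max_le _ _ _ le_rfl ?_
  intro x hx
  rcases List.mem_map.1 hx with ⟨s, hs, rfl⟩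
  exact h s hs

lemma pvBest_update {n : Int} {c : Int → Int} {s0 : Int}
    (hs0 : 0 ≤ s0 ∧ s0 < n) (hc : ∀ s ∈ PySem.List.pyRange 0 n 1, 0 ≤ c s) :
    pvBest n (fun s => if s = s0 then c s0 + 1 else c s) = max (pvBest n c) (c s0 + 1) := by
  have hmem : s0 ∈ PySem.List.pyRange 0 n 1 := PySem.List.mem_pyRange_one.2 hs0
  refine le_antisymm ?_ (max_le ?_ ?_)
  · rw [pvBest_eq_foldl_map]
    refine pv_foldl_max_le _ _ _ (le_max_of_le_left (pvBest_nonneg n c)) ?_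
    intro x hx
    rcases List.mem_map.1 hx with ⟨s, hs, rfl⟩
    by_cases h : s = s0
    · subst h
      simp
    · simp only [if_neg h]
      exact le_max_of_le_left (le_pvBest n c s hs)
  · -- pvBest n c ≤ pvBest n c'
    rcases PySem.List.foldl_max_mem ((PySem.List.pyRange 0 n 1).map c) 0 with h0 | hm
    · rw [pvBest_eq_foldl_map, h0]
      exact pvBest_nonneg n _
    · rcases List.mem_map.1 hm with ⟨s, hs, hval⟩
      rw [pvBest_eq_foldl_map, ← hval]
      have h1 : c s ≤ (if s = s0 then c s0 + 1 else c s) := by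
        by_cases h : s = s0
        · subst h; simp
        · simp [h]
      have h2 := le_pvBest n (fun s => if s = s0 then c s0 + 1 else c s) s hs
      exact le_trans h1 h2
  · have h2 := le_pvBest n (fun s => if s = s0 then c s0 + 1 else c s) s0 hmem
    simpa using h2

lemma pv_margs_getD (ps : List (Int × Int)) :
    ∀ (d : PySem.Dict (Int × Int) Int) (k : Int × Int),
      (ps.foldl pvStepA d).getD k 0 = d.getD k 0 + (ps.count k : Int) := by
  induction ps with
  | nil => intro d k; simp
  | cons x ps ih =>
    intro d k
    simp only [List.foldl_cons, ih, List.count_cons]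
    have hstep : (pvStepA d x).getD k 0 = d.getD k 0 + if k = x then 1 else 0 := by
      unfold pvStepA
      by_cases hc : d.contains x
      · rw [if_pos hc, PySem.Dict.getD_modify]
        by_cases h : k = x <;> simp [h]
      · rw [if_neg (by simpa using hc), PySem.Dict.getD_insert]
        by_cases h : k = x
        · subst h; simp [PySem.Dict.getD_of_not_contains d 0 (by simpa using hc)]
        · simp [h]
    rw [hstep]
    by_cases h : k = x
    · simp [h]
      push_cast
      ring
    · simp [h]
      intro hc
      exact h hc.symm

lemma pv_margs_contains (ps : List (Int × Int)) :
    ∀ (d : PySem.Dict (Int × Int) Int) (k : Int × Int),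
      (ps.foldl pvStepA d).contains k = (d.contains k || decide (k ∈ ps)) := by
  induction ps with
  | nil => intro d k; simp
  | cons x ps ih =>
    intro d k
    simp only [List.foldl_cons, ih]
    have hstep : (pvStepA d x).contains k = ((k == x) || d.contains k) := by
      unfold pvStepA
      by_cases hc : d.contains x
      · rw [if_pos hc, PySem.Dict.contains_modify]
      · rw [if_neg (by simpa using hc), PySem.Dict.contains_insert]
    rw [hstep]
    by_cases h : k = x <;> by_cases h2 : k ∈ ps <;> simp [h, h2]

lemma pvASide_eq (n : Int) (ps : List (Int × Int)) :
    pvASide n ps =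
      ((PySem.Set.ofList (ps.map (·.1))).map
        (fun r => pvBest n (fun s => pvCnt ps (r, s)))).sum := by
  unfold pvASide computeSumOfMaxes
  have hkeys : (ps.foldl (fun d k => d.insert k.1 true) PySem.Dict.empty).keys
      = PySem.Set.ofList (ps.map (·.1)) := by
    rw [PySem.Dict.keys_foldl_insert_key ps (·.1) (fun _ _ => true) PySem.Dict.empty,
      PySem.Dict.keys_empty]
    rw [PySem.Set.ofList_eq_foldl]
    rfl
  rw [hkeys]
  have hinner : ∀ (acc : Int), ∀ r ∈ PySem.Set.ofList (ps.map (·.1)),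
      (fun returnValue name =>
        returnValue +
          (PySem.List.pyRange 0 n 1).foldl (fun maxValue splitIndex =>
            let thisValue := if (ps.foldl pvStepA PySem.Dict.empty).contains (name, splitIndex)
              then (ps.foldl pvStepA PySem.Dict.empty).getD (name, splitIndex) 0 else 0
            if thisValue > maxValue then thisValue else maxValue) 0) acc r
      = (fun acc r => acc + pvBest n (fun s => pvCnt ps (r, s))) acc r := by
    intro acc r _
    simp only
    congr 1
    unfold pvBest
    refine PySem.List.foldl_congr_mem _ _ _ _ ?_
    intro m s _
    have htv : (if (ps.foldl pvStepA PySem.Dict.empty).contains (r, s)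
        then (ps.foldl pvStepA PySem.Dict.empty).getD (r, s) 0 else 0) = pvCnt ps (r, s) := by
      by_cases hc : (ps.foldl pvStepA PySem.Dict.empty).contains (r, s)
      · rw [if_pos hc, pv_margs_getD, PySem.Dict.getD_empty]
        simp [pvCnt]
      · rw [if_neg (by simpa using hc)]
        have := pv_margs_contains ps PySem.Dict.empty (r, s)
        rw [PySem.Dict.contains_empty] at this
        simp only [Bool.false_or] at this
        rw [this] at hc
        have hnot : (r, s) ∉ ps := by simpa using hc
        simp [pvCnt, List.count_eq_zero_of_not_mem hnot]
    simp only [htv]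
    by_cases h : pvCnt ps (r, s) > m
    · rw [if_pos h, max_eq_right (le_of_lt h)]
    · rw [if_neg h, max_eq_left (by omega)]
  rw [PySem.List.foldl_congr_mem _ _ _ _ hinner, PySem.List.foldl_add]
  simp

-- B's loop invariant: counts for in-range keys, the best dict's keys, and its values
lemma pvBInv (n : Int) (ps : List (Int × Int)) :
    (∀ k : Int × Int, 0 ≤ k.2 ∧ k.2 < n →
        (ps.foldl (bStep n) (PySem.Dict.empty, PySem.Dict.empty)).1.getD k 0 = pvCnt ps k)
    ∧ (ps.foldl (bStep n) (PySem.Dict.empty, PySem.Dict.empty)).2.keys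
        = PySem.Set.ofList ((ps.filter (fun k => decide (0 ≤ k.2 ∧ k.2 < n))).map (·.1))
    ∧ (∀ r : Int, (ps.foldl (bStep n) (PySem.Dict.empty, PySem.Dict.empty)).2.getD r 0
        = pvBest n (fun s => pvCnt ps (r, s))) := by
  induction ps using List.reverseRecOn with
  | nil =>
    refine ⟨fun k _ => by simp [pvCnt], by simp, fun r => ?_⟩
    simp only [List.foldl_nil]
    show (PySem.Dict.empty : PySem.Dict Int Int).getD r 0 = _
    rw [PySem.Dict.getD_empty]
    exact (pvBest_zero (fun s _ => by simp [pvCnt])).symm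
  | append_singleton ps k0 ih =>
    obtain ⟨ih1, ih2, ih3⟩ := ih
    set st := ps.foldl (bStep n) (PySem.Dict.empty, PySem.Dict.empty) with hst
    have hfold : ((ps ++ [k0]).foldl (bStep n) (PySem.Dict.empty, PySem.Dict.empty))
        = bStep n st k0 := by rw [List.foldl_append]; rfl
    have hcnt_app : ∀ k : Int × Int, pvCnt (ps ++ [k0]) k
        = pvCnt ps k + (if k = k0 then 1 else 0) := by
      intro k
      simp only [pvCnt, List.count_append, List.count_singleton, beq_iff_eq]
      by_cases h : k = k0
      · subst h; simp
      · have h' : ¬(k0 = k) := fun hc => h hc.symm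
        simp [h, h']
    have hcnt_nonneg : ∀ (l : List (Int × Int)) (k : Int × Int), 0 ≤ pvCnt l k := by
      intro l k; simp [pvCnt]
    by_cases hr : 0 ≤ k0.2 ∧ k0.2 < n
    · -- in-range element
      have hv : st.1.getD k0 0 = pvCnt ps k0 := ih1 k0 hr
      have hbstep : bStep n st k0
          = (st.1.insert k0 (st.1.getD k0 0 + 1),
             if st.1.getD k0 0 + 1 > st.2.getD k0.1 0 then st.2.insert k0.1 (st.1.getD k0 0 + 1) else st.2) := by
        unfold bStep; rw [if_pos hr]
      have hfilter : (ps ++ [k0]).filter (fun k => decide (0 ≤ k.2 ∧ k.2 < n))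
          = ps.filter (fun k => decide (0 ≤ k.2 ∧ k.2 < n)) ++ [k0] := by
        simp [List.filter_append, hr]
      -- new best for the affected name, via the update lemma
      have hbest_k0 : pvBest n (fun s => pvCnt (ps ++ [k0]) (k0.1, s))
          = max (pvBest n (fun s => pvCnt ps (k0.1, s))) (pvCnt ps k0 + 1) := by
        have hcongr : pvBest n (fun s => pvCnt (ps ++ [k0]) (k0.1, s))
            = pvBest n (fun s => if s = k0.2 then pvCnt ps (k0.1, k0.2) + 1 else pvCnt ps (k0.1, s)) := by
          refine pvBest_congr (fun s _ => ?_)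
          rw [hcnt_app]
          by_cases h : s = k0.2
          · subst h; simp
          · have : (k0.1, s) ≠ k0 := by
              intro hcontra; apply h; rw [← hcontra]
            simp [this, Ne.symm this, h]
        rw [hcongr, pvBest_update hr (fun s _ => hcnt_nonneg ps _)]
      refine ⟨?_, ?_, ?_⟩
      · -- counts
        intro k hk
        rw [hfold, hbstep]
        simp only
        rw [PySem.Dict.getD_insert, hcnt_app]
        by_cases h : k = k0
        · rw [if_pos h, if_pos h, h, hv]
        · rw [if_neg h, if_neg h, add_zero, ih1 k hk]
      · -- keys
        rw [hfold, hbstep, hfilter]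
        simp only [List.map_append]
        rw [PySem.Set.ofList_eq_foldl, List.foldl_append, ← PySem.Set.ofList_eq_foldl]
        simp only [List.map_cons, List.map_nil, List.foldl_cons, List.foldl_nil]
        by_cases hins : st.1.getD k0 0 + 1 > st.2.getD k0.1 0
        · rw [if_pos hins]
          by_cases hmem : k0.1 ∈ st.2.keys
          · rw [PySem.Dict.keys_insert_of_contains _ _ ((PySem.Dict.contains_iff_mem_keys _ _).2 hmem)]
            rw [ih2] at hmem ⊢
            rw [PySem.Set.add_of_mem hmem]
          · rw [PySem.Dict.keys_insert_of_not_contains _ _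
              (by rw [← Bool.not_eq_true]; intro hc; exact hmem ((PySem.Dict.contains_iff_mem_keys _ _).1 hc))]
            rw [ih2] at hmem ⊢
            rw [PySem.Set.add_of_not_mem hmem]
        · -- no insert: k0.1 must already be a key
          rw [if_neg hins]
          have hmem : k0.1 ∈ st.2.keys := by
            by_contra hmem
            -- then every in-range count for k0.1 is 0, so the best is 0, contradicting v ≤ best
            have hzero : ∀ s ∈ PySem.List.pyRange 0 n 1, pvCnt ps (k0.1, s) ≤ 0 := by
              intro s hs
              have hsr := PySem.List.mem_pyRange_one.1 hs
              by_contra hpos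
              have hmem' : (k0.1, s) ∈ ps := by
                by_contra hnm
                exact hpos (by simp [pvCnt, List.count_eq_zero_of_not_mem hnm])
              apply hmem
              rw [ih2, PySem.Set.mem_ofList]
              refine List.mem_map.2 ⟨(k0.1, s), ?_, rfl⟩
              rw [List.mem_filter]
              exact ⟨hmem', by simpa using hsr⟩
            have hb0 : st.2.getD k0.1 0 = 0 := by
              rw [ih3, pvBest_zero hzero]
            rw [hb0, hv] at hins
            exact hins (by have := hcnt_nonneg ps k0; omega)
          rw [ih2] at hmem
          rw [ih2, PySem.Set.add_of_mem hmem]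
      · -- best values
        intro r
        rw [hfold, hbstep]
        simp only
        by_cases h : r = k0.1
        · subst h
          rw [hbest_k0, ← ih3 k0.1, hv]
          by_cases hins : pvCnt ps k0 + 1 > st.2.getD k0.1 0
          · rw [if_pos hins, PySem.Dict.getD_insert_self]
            exact (max_eq_right (le_of_lt hins)).symm
          · rw [if_neg hins]
            exact (max_eq_left (by omega)).symm
        · have hcongr : pvBest n (fun s => pvCnt (ps ++ [k0]) (r, s))
              = pvBest n (fun s => pvCnt ps (r, s)) := by
            refine pvBest_congr (fun s _ => ?_)
            rw [hcnt_app]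
            have : (r, s) ≠ k0 := by
              intro hcontra; apply h; rw [← hcontra]
            simp [this, Ne.symm this]
          rw [hcongr, ← ih3]
          by_cases hins : st.1.getD k0 0 + 1 > st.2.getD k0.1 0
          · rw [if_pos hins, PySem.Dict.getD_insert_of_ne _ _ _ h]
          · rw [if_neg hins]
    · -- out-of-range element: state unchanged
      have hbstep : bStep n st k0 = st := by unfold bStep; rw [if_neg hr]
      have hfilter : (ps ++ [k0]).filter (fun k => decide (0 ≤ k.2 ∧ k.2 < n))
          = ps.filter (fun k => decide (0 ≤ k.2 ∧ k.2 < n)) := by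
        simp [List.filter_append, hr]
      refine ⟨?_, ?_, ?_⟩
      · intro k hk
        rw [hfold, hbstep, ih1 k hk, hcnt_app]
        have : k ≠ k0 := by
          intro hcontra; subst hcontra; exact hr hk
        simp [this, Ne.symm this]
      · rw [hfold, hbstep, hfilter, ih2]
      · intro r
        rw [hfold, hbstep, ih3]
        refine pvBest_congr (fun s hs => ?_)
        have hsr := PySem.List.mem_pyRange_one.1 hs
        rw [hcnt_app]
        have : (r, s) ≠ k0 := by
          intro hcontra
          apply hr
          rw [← hcontra]
          exact hsr
        simp [this, Ne.symm this]

lemma pvBSide_eq (n : Int) (ps : List (Int × Int)) :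
    pvBSide n ps =
      ((PySem.Set.ofList ((ps.filter (fun k => decide (0 ≤ k.2 ∧ k.2 < n))).map (·.1))).map
        (fun r => pvBest n (fun s => pvCnt ps (r, s)))).sum := by
  obtain ⟨_, h2, h3⟩ := pvBInv n ps
  unfold pvBSide
  rw [PySem.Dict.values_eq_map_keys _ (by rw [h2]; exact PySem.Set.nodup_ofList _) 0, h2]
  congr 1
  exact List.map_congr_left (fun r _ => h3 r)

-- summing over the full name set equals summing over the names with an in-range entry,
-- because the summand vanishes on the difference
lemma pv_sum_restrict (A K : List Int) (f : Int → Int) (hA : A.Nodup) (hK : K.Nodup)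
    (hsub : ∀ x ∈ K, x ∈ A) (hz : ∀ x ∈ A, x ∉ K → f x = 0) :
    (A.map f).sum = (K.map f).sum := by
  have hperm : (A.filter (fun x => decide (x ∈ K)) ++ A.filter (fun x => !decide (x ∈ K))).Perm A :=
    List.filter_append_perm _ A
  have hsum : (A.map f).sum
      = ((A.filter (fun x => decide (x ∈ K))).map f).sum
        + ((A.filter (fun x => !decide (x ∈ K))).map f).sum := by
    rw [← List.sum_append, ← List.map_append]
    exact (List.Perm.sum_eq (List.Perm.map f hperm)).symm
  have hz' : ((A.filter (fun x => !decide (x ∈ K))).map f).sum = 0 := by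
    refine List.sum_eq_zero ?_
    intro y hy
    rcases List.mem_map.1 hy with ⟨x, hx, rfl⟩
    rw [List.mem_filter] at hx
    exact hz x hx.1 (by simpa using hx.2)
  have hpermK : (A.filter (fun x => decide (x ∈ K))).Perm K := by
    rw [List.perm_ext_iff_of_nodup (List.Nodup.filter _ hA) hK]
    intro a
    rw [List.mem_filter]
    constructor
    · intro ⟨_, h⟩; simpa using h
    · intro h; exact ⟨hsub a h, by simpa using h⟩
  rw [hsum, hz', add_zero]
  exact List.Perm.sum_eq (List.Perm.map f hpermK)

lemma pvSide_eq (n : Int) (ps : List (Int × Int)) : pvASide n ps = pvBSide n ps := by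
  rw [pvASide_eq, pvBSide_eq]
  refine pv_sum_restrict _ _ _ (PySem.Set.nodup_ofList _) (PySem.Set.nodup_ofList _) ?_ ?_
  · intro x hx
    rw [PySem.Set.mem_ofList] at hx ⊢
    rcases List.mem_map.1 hx with ⟨k, hk, rfl⟩
    exact List.mem_map_of_mem (List.mem_of_mem_filter hk)
  · intro r hr hnr
    refine pvBest_zero (fun s hs => ?_)
    have hsr := PySem.List.mem_pyRange_one.1 hs
    by_contra hpos
    have hmem' : (r, s) ∈ ps := by
      by_contra hnm
      exact hpos (by simp [pvCnt, List.count_eq_zero_of_not_mem hnm])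
    apply hnr
    rw [PySem.Set.mem_ofList]
    refine List.mem_map.2 ⟨(r, s), ?_, rfl⟩
    rw [List.mem_filter]
    exact ⟨hmem', by simpa using hsr⟩

-- the ports, rewritten as the generic per-projection sides
lemma pvA_as_sides (n : Int) (l : List (Int × Int × Int)) :
    evaluateSplit n l
      = pvASide n (l.map (fun t => (t.1, t.2.2))) + pvASide n (l.map (fun t => (t.2.1, t.2.2))) := by
  unfold evaluateSplit pvASide
  rw [PySem.List.foldl_prod_mk (f := fun (d : PySem.Dict Int Bool) (t : Int × Int × Int) => d.insert t.1 true)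
    (g := fun (d : PySem.Dict (Int × Int) Int) (t : Int × Int × Int) =>
      if d.contains (t.1, t.2.2) then d.modify (t.1, t.2.2) 0 (· + 1) else d.insert (t.1, t.2.2) 1)]
  rw [PySem.List.foldl_prod_mk (f := fun (d : PySem.Dict Int Bool) (t : Int × Int × Int) => d.insert t.2.1 true)
    (g := fun (d : PySem.Dict (Int × Int) Int) (t : Int × Int × Int) =>
      if d.contains (t.2.1, t.2.2) then d.modify (t.2.1, t.2.2) 0 (· + 1) else d.insert (t.2.1, t.2.2) 1)]
  simp only [List.foldl_map]
  rfl

lemma pvB_as_sides (n : Int) (l : List (Int × Int × Int)) :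
    evaluateSplit_alt n l
      = pvBSide n (l.map (fun t => (t.1, t.2.2))) + pvBSide n (l.map (fun t => (t.2.1, t.2.2))) := by
  unfold evaluateSplit_alt pvBSide
  rw [PySem.List.foldl_prod_mk
    (f := fun (st : PySem.Dict (Int × Int) Int × PySem.Dict Int Int) (t : Int × Int × Int) => bStep n st (t.1, t.2.2))
    (g := fun (st : PySem.Dict (Int × Int) Int × PySem.Dict Int Int) (t : Int × Int × Int) => bStep n st (t.2.1, t.2.2))]
  simp only [List.foldl_map]

-- ===== VERDICT (by name: the statement is the Claim_ definition above) =====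
theorem evaluateSplit_spec : Claim_equal_evaluateSplit := by
  intro n l _
  unfold Spec_evaluateSplit
  rw [pvA_as_sides, pvB_as_sides, pvSide_eq, pvSide_eq]
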